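-- pv_equiv track=rewrite | github.com/ryandakine/MultiSportsBettingPlatform | advanced_ai_features_v3.py | _find_streaks
-- ===== SOURCE A (Python) =====
-- from typing import Dict, List, Optional, Any, Tuple, Union
--
-- def _find_streaks(data: List[Dict[str, Any]], key: str, value: str) -> List[int]:
--     """Find streaks in data"""
--     streaks = []
--     current_streak = 0
--
--     for item in data:
--         if item.get(key) == value:
--             current_streak += 1
--         else:
--             if current_streak > 0:
--                 streaks.append(current_streak)
--             current_streak = 0
--
--     if current_streak > 0:
--         streaks.append(current_streak)
--
--     return streaks
-- ===== SOURCE B (Python) =====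
-- from itertools import groupby
-- from typing import Dict, List, Any
--
-- def _find_streaks(data: List[Dict[str, Any]], key: str, value: str) -> List[int]:
--     """Find streaks in data (groupby over the match predicate)."""
--     return [sum(1 for _ in g)
--             for matched, g in groupby(data, key=lambda item: item.get(key) == value)
--             if matched]
-- ===== Notes on version B (the rewrite author's own statement) =====
-- stated objective: idiomatic
-- what changed: Replaces the maintained counter with its reset/flush branches and end-of-loop flush by itertools.groupby on the match predicate: lengths of the True-keyed adjacent groups are collected in one comprehension.
import Mathlib
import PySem

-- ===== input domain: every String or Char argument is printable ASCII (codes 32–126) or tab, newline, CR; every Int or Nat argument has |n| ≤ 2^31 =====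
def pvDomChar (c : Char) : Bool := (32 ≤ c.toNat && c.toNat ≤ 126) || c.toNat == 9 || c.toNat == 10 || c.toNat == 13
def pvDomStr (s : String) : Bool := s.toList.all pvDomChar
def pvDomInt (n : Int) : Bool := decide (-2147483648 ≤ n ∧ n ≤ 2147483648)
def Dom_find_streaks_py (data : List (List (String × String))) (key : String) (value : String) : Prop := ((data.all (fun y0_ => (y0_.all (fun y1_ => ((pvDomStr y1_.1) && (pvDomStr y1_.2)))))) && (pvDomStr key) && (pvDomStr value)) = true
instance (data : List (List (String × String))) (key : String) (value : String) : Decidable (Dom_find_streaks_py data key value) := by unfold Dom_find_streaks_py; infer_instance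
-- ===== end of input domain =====

-- B replaces A's maintained counter and flush branches by grouping adjacent
-- equal predicate values (itertools.groupby) and collecting the lengths of the
-- True groups — idiomatic, same O(n) cost.


-- ===== PORT A =====
-- for item in data: if item.get(key) == value: current += 1 else: flush; final flush
def find_streaks_py (data : List (List (String × String))) (key : String) (value : String) : List Int :=
  let st := data.foldl (fun (s : List Int × Int) item =>
    if (PySem.Dict.mk item).get? key == some value then (s.1, s.2 + 1)
    else (if s.2 > 0 then s.1 ++ [s.2] else s.1, 0)) ([], 0)
  if st.2 > 0 then st.1 ++ [st.2] else st.1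

-- ===== PORT B =====
-- hand port of itertools.groupby specialised to this use: adjacent runs of equal
-- keys, each with its length (exact: groupby yields one (key, group) per maximal
-- run of equal key values, and sum(1 for _ in g) is the run length)
def pvGroupLens : List Bool → List (Bool × Int)
  | [] => []
  | b :: rest =>
    match pvGroupLens rest with
    | (b', n) :: gs => if b == b' then (b, n + 1) :: gs else (b, 1) :: (b', n) :: gs
    | [] => [(b, 1)]

def find_streaks_py_alt (data : List (List (String × String))) (key : String) (value : String) : List Int :=
  (pvGroupLens (data.map (fun item => (PySem.Dict.mk item).get? key == some value))).filterMap
    (fun g => if g.1 then some g.2 else none)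

-- ===== PRECONDITION & SPEC =====
def Spec_find_streaks_py (data : List (List (String × String))) (key : String) (value : String) (out : List Int) : Prop := out = find_streaks_py_alt data key value
instance (data : List (List (String × String))) (key : String) (value : String) (out : List Int) : Decidable (Spec_find_streaks_py data key value out) := by unfold Spec_find_streaks_py; infer_instance

-- ===== CLAIM (what is proved, stated in full; the proofs are below) =====
def Claim_equal_find_streaks_py : Prop := ∀ (data : List (List (String × String))) (key : String) (value : String), Dom_find_streaks_py data key value → Spec_find_streaks_py data key value (find_streaks_py data key value)

-- ===== LEMMAS AND PROOFS =====

-- spec-side recursion: the streak list produced from an in-progress count `cur`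
def pvStreaksFrom (cur : Int) : List Bool → List Int
  | [] => if cur > 0 then [cur] else []
  | true :: r => pvStreaksFrom (cur + 1) r
  | false :: r => (if cur > 0 then [cur] else []) ++ pvStreaksFrom 0 r

def pvF (gs : List (Bool × Int)) : List Int := gs.filterMap (fun g => if g.1 then some g.2 else none)

-- A's fold (with the final flush) equals pvStreaksFrom over the predicate list
theorem pvFoldA_eq (key value : String) :
    ∀ (data : List (List (String × String))) (s : List Int) (cur : Int),
      (let st := data.foldl (fun (s : List Int × Int) item =>
        if (PySem.Dict.mk item).get? key == some value then (s.1, s.2 + 1)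
        else (if s.2 > 0 then s.1 ++ [s.2] else s.1, 0)) (s, cur);
       if st.2 > 0 then st.1 ++ [st.2] else st.1)
      = s ++ pvStreaksFrom cur (data.map (fun item => (PySem.Dict.mk item).get? key == some value)) := by
  intro data
  induction data with
  | nil =>
    intro s cur
    simp only [List.foldl_nil, List.map_nil, pvStreaksFrom]
    split_ifs <;> simp
  | cons item rest ih =>
    intro s cur
    simp only [List.foldl_cons, List.map_cons]
    by_cases h : ((PySem.Dict.mk item).get? key == some value) = true
    · simp only [h, ih]
      rfl
    · rw [Bool.not_eq_true] at h
      simp only [h, Bool.false_eq_true, if_false, ih, pvStreaksFrom]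
      split_ifs <;> simp

-- pvStreaksFrom vs the group lengths: joint statement for cur = 0 and cur > 0
theorem pvStreaks_groups :
    ∀ (bl : List Bool),
      pvStreaksFrom 0 bl = pvF (pvGroupLens bl) ∧
      ∀ cur : Int, 0 < cur →
        pvStreaksFrom cur bl =
          (match pvGroupLens bl with
           | (true, n) :: gs => (cur + n) :: pvF gs
           | gs => cur :: pvF gs) := by
  intro bl
  induction bl with
  | nil =>
    refine ⟨rfl, ?_⟩
    intro cur hcur
    simp only [pvStreaksFrom, pvGroupLens, if_pos hcur, pvF, List.filterMap_nil]
  | cons b r ih =>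
    obtain ⟨ih0, ihpos⟩ := ih
    cases b with
    | true =>
      constructor
      · show pvStreaksFrom 1 r = _
        rw [ihpos 1 (by norm_num)]
        simp only [pvGroupLens]
        match hg : pvGroupLens r with
        | (true, n) :: gs => simp [pvF, add_comm]
        | (false, n) :: gs => simp [pvF]
        | [] => simp [pvF]
      · intro cur hcur
        show pvStreaksFrom (cur + 1) r = _
        rw [ihpos (cur + 1) (by omega)]
        simp only [pvGroupLens]
        match hg : pvGroupLens r with
        | (true, n) :: gs => simp [pvF]; ring
        | (false, n) :: gs => simp [pvF]
        | [] => simp [pvF]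
    | false =>
      have hfalse : pvF (pvGroupLens (false :: r)) = pvF (pvGroupLens r) := by
        simp only [pvGroupLens]
        match hg : pvGroupLens r with
        | (true, n) :: gs => simp [pvF]
        | (false, n) :: gs => simp [pvF]
        | [] => simp [pvF]
      constructor
      · show (if (0:Int) > 0 then [(0:Int)] else []) ++ pvStreaksFrom 0 r = _
        rw [hfalse, ih0]; simp
      · intro cur hcur
        show (if cur > 0 then [cur] else []) ++ pvStreaksFrom 0 r = _
        rw [if_pos hcur, ih0]
        have hhead : (match pvGroupLens (false :: r) with
           | (true, n) :: gs => (cur + n) :: pvF gs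
           | gs => cur :: pvF gs) = cur :: pvF (pvGroupLens (false :: r)) := by
          simp only [pvGroupLens]
          match hg : pvGroupLens r with
          | (true, n) :: gs => simp [pvF]
          | (false, n) :: gs => simp [pvF]
          | [] => simp [pvF]
        rw [hhead, hfalse]
        simp

-- ===== VERDICT (by name: the statement is the Claim_ definition above) =====
theorem find_streaks_py_spec : Claim_equal_find_streaks_py := by
  intro data key value _
  show find_streaks_py data key value = find_streaks_py_alt data key value
  unfold find_streaks_py find_streaks_py_alt
  rw [pvFoldA_eq key value data [] 0]
  simp [(pvStreaks_groups _).1, pvF]
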